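-- pv_equiv track=rewrite | github.com/imdduoming/hitalgor | Codingtest/L1.py | solution
-- ===== SOURCE A (Python) =====
-- from typing import List
--
-- def solve(num):
--     cnt=1
--     while True:
--         if cnt>=num:
--             num=cnt
--             break
--         else:
--             cnt=cnt*2
--     return num
--
-- def solution(queries: List[List[int]]) -> int:
--     answer = 0
--     dict= {}
--     for i,j in queries:
--         if i not in dict:
--             dict[i]=[0,0]
--
--         if j+dict[i][1] <= dict[i][0]:
--             # 원소수 <=배열크기
--             dict[i][1]+=j
--         else:
--             answer+=dict[i][1]
--             new_size= solve(dict[i][1]+j)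
--             dict[i][0]=new_size
--             dict[i][1]=dict[i][1]+j
--
--     return answer
-- ===== SOURCE B (Python) =====
-- def solve(num):
--     cnt = 1
--     while True:
--         if cnt >= num:
--             num = cnt
--             break
--         else:
--             cnt = cnt * 2
--     return num
--
--
-- def cap(m):
--     # capacity of a table whose running maximum of element counts is m:
--     # 0 while the count never went positive, else the least power of two >= m
--     return 0 if m <= 0 else solve(m)
--
--
-- def group_answer(js):
--     # answer contributed by one key: walk the prefix sums of js; the table
--     # overflows exactly when a prefix sum exceeds cap(running max so far),
--     # and each overflow copies the elements present just before it.
--     total = 0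
--     p = 0
--     m = 0
--     for j in js:
--         q = p + j
--         if q > cap(m):
--             total += p
--         p = q
--         if q > m:
--             m = q
--     return total
--
--
-- def solution(queries):
--     groups = {}
--     for i, j in queries:
--         groups.setdefault(i, []).append(j)
--     return sum(group_answer(js) for js in groups.values())
-- ===== Notes on version B (the rewrite author's own statement) =====
-- stated objective: alternative
-- what changed: B eliminates A's stored per-key [size,count] dict state: it groups the sizes per key, then for each group walks the prefix sums with their running maximum, derives the current capacity as cap(running max) (0 or the least power of two >= it) instead of maintaining it, adds the previous prefix sum at each overflow, and sums the per-key answers.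
import Mathlib
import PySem

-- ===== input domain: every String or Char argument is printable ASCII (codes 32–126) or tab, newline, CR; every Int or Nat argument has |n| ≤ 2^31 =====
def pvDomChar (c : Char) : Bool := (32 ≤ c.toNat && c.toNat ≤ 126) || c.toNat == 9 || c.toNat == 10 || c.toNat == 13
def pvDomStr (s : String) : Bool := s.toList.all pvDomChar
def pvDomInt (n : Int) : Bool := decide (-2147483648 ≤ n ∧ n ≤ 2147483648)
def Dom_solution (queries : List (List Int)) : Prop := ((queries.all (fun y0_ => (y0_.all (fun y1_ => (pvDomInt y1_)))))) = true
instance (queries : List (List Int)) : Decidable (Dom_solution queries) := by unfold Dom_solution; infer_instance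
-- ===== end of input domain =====

-- B drops A's stored per-key [size,count] state: it groups queries per key, then walks each
-- group's prefix sums, deriving the capacity from their running maximum and adding the previous
-- prefix sum at each overflow. Objective: alternative algorithm (same asymptotic cost).

-- ===== PORT A =====
-- termination facts for solveGo, named so the definition body stays free of tactic proof terms
theorem solveGo_hc (cnt : Int) (hc : 1 ≤ cnt) : 1 ≤ cnt * 2 := by omega

theorem solveGo_dec (num cnt : Int) (h : ¬ cnt ≥ num) (hc : 1 ≤ cnt) :
    (num - cnt * 2).toNat < (num - cnt).toNat := by omega

-- while loop of solve: cnt starts at 1 and doubles until cnt >= num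
def solveGo (num cnt : Int) (hc : 1 ≤ cnt) : Int :=
  if h : cnt ≥ num then cnt
  else solveGo num (cnt * 2) (solveGo_hc cnt hc)
termination_by (num - cnt).toNat
decreasing_by exact solveGo_dec num cnt h hc

theorem solve_one_le : (1 : Int) ≤ 1 := le_refl 1

def solve (num : Int) : Int := solveGo num 1 solve_one_le

-- one iteration of A's 'for i,j in queries' loop (state: (answer, dict));
-- a row of length ≠ 2 raises ValueError in Python — such inputs are excluded by Pre_solution
def stepA (acc : Int × PySem.Dict Int (Int × Int)) (q : List Int) : Int × PySem.Dict Int (Int × Int) :=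
  match q with
  | [i, j] =>
    let d := if acc.2.contains i then acc.2 else acc.2.insert i (0, 0)
    let p := d.getD i (0, 0)
    if j + p.2 ≤ p.1 then (acc.1, d.insert i (p.1, p.2 + j))
    else (acc.1 + p.2, d.insert i (solve (p.2 + j), p.2 + j))
  | _ => acc

def solution (queries : List (List Int)) : Int :=
  (queries.foldl stepA ((0 : Int), (PySem.Dict.empty : PySem.Dict Int (Int × Int)))).1

-- ===== PORT B =====
-- capacity of a table whose running maximum of element counts is m
def cap (m : Int) : Int := if m ≤ 0 then 0 else solve m

-- grouping pass: groups.setdefault(i, []).append(j)  (rows of length ≠ 2 raise; excluded by Pre_solution)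
def groupStep (g : PySem.Dict Int (List Int)) (q : List Int) : PySem.Dict Int (List Int) :=
  match q with
  | [i, j] => g.modify i [] (· ++ [j])
  | _ => g

-- loop body of group_answer, state (p, m, total) = (prefix sum, running max, total)
def gaStep (st : Int × Int × Int) (j : Int) : Int × Int × Int :=
  let q := st.1 + j
  (q, (if q > st.2.1 then q else st.2.1), st.2.2 + (if q > cap st.2.1 then st.1 else 0))

def groupAnswer (js : List Int) : Int := (js.foldl gaStep (0, 0, 0)).2.2

def solution_alt (queries : List (List Int)) : Int :=
  let groups := queries.foldl groupStep (PySem.Dict.empty : PySem.Dict Int (List Int))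
  (groups.values.map groupAnswer).sum

-- ===== PRECONDITION & SPEC =====
-- Pre_ excludes rows whose length is not 2: there Python's 'for i,j in queries' (A) and (B) both raise ValueError.
def Pre_solution (queries : List (List Int)) : Prop := ∀ q ∈ queries, q.length = 2
instance (queries : List (List Int)) : Decidable (Pre_solution queries) := by unfold Pre_solution; infer_instance

def pvWitness_solution : List (List Int) := [[1, 3], [2, 5], [1, 2], [1, 7]]

def Spec_solution (queries : List (List Int)) (out : Int) : Prop := out = solution_alt queries
instance (queries : List (List Int)) (out : Int) : Decidable (Spec_solution queries out) := by unfold Spec_solution; infer_instance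

-- ===== CLAIM (what is proved, stated in full; the proofs are below) =====
def Claim_equal_solution : Prop := ∀ (queries : List (List Int)), Dom_solution queries → Pre_solution queries → Spec_solution queries (solution queries)

-- ===== LEMMAS AND PROOFS =====

-- one iteration of A's loop written with simulation state (size, count, answer), for the invariant
def simStep (st : Int × Int × Int) (j : Int) : Int × Int × Int :=
  if j + st.2.1 ≤ st.1 then (st.1, st.2.1 + j, st.2.2)
  else (solve (st.2.1 + j), st.2.1 + j, st.2.2 + st.2.1)

def grpOf (qs : List (List Int)) : PySem.Dict Int (List Int) :=
  qs.foldl groupStep PySem.Dict.empty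

def delta (js : List Int) : Int := (js.foldl simStep (0, 0, 0)).2.2

def sumDelta (G : PySem.Dict Int (List Int)) : Int :=
  (G.keys.map (fun k => delta (G.getD k []))).sum

-- ---- solve / cap facts ----
theorem solveGo_ge (num cnt : Int) (hc : 1 ≤ cnt) :
    num ≤ solveGo num cnt hc ∧ cnt ≤ solveGo num cnt hc := by
  rw [solveGo]
  split_ifs with h
  · exact ⟨h, le_refl cnt⟩
  · have := solveGo_ge num (cnt * 2) (by omega)
    omega
termination_by (num - cnt).toNat
decreasing_by omega

theorem solveGo_stable (num cnt : Int) (hc : 1 ≤ cnt) (q : Int)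
    (h1 : num ≤ q) (h2 : q ≤ solveGo num cnt hc) :
    solveGo q cnt hc = solveGo num cnt hc := by
  by_cases h : cnt ≥ num
  · have hn : solveGo num cnt hc = cnt := by rw [solveGo]; simp [h]
    rw [hn] at h2
    rw [solveGo]; simp [h2, hn]
  · have hn : solveGo num cnt hc = solveGo num (cnt * 2) (by omega) := by
      rw [solveGo]; simp [h]
    have hq : ¬ cnt ≥ q := by omega
    have hqn : solveGo q cnt hc = solveGo q (cnt * 2) (by omega) := by
      rw [solveGo]; simp [hq]
    rw [hqn, hn]
    exact solveGo_stable num (cnt * 2) (by omega) q h1 (hn ▸ h2)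
termination_by (num - cnt).toNat
decreasing_by omega

theorem solve_ge (num : Int) : num ≤ solve num ∧ 1 ≤ solve num := solveGo_ge num 1 (by norm_num)

theorem cap_ge (m : Int) (_hm0 : 0 ≤ m) : m ≤ cap m := by
  unfold cap
  split_ifs with hm
  · omega
  · exact (solve_ge m).1

theorem cap_stable (m q : Int) (hm : 0 ≤ m) (hq : q ≤ cap m) :
    cap (if q > m then q else m) = cap m := by
  split_ifs with h
  · by_cases hm0 : m ≤ 0
    · have : m = 0 := by omega
      subst this
      unfold cap at hq ⊢
      simp at hq
      omega
    · unfold cap at hq ⊢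
      have h1 : ¬ m ≤ 0 := hm0
      have h2 : ¬ q ≤ 0 := by omega
      simp only [if_neg h1] at hq
      simp only [if_neg h1, if_neg h2]
      exact solveGo_stable m 1 (by norm_num) q (by omega) hq
  · rfl

theorem cap_growth (m q : Int) (hm : 0 ≤ m) (hq : q > cap m) :
    ((if q > m then q else m) = q) ∧ cap q = solve q := by
  have h1 := cap_ge m hm
  have h2 : q > m := by omega
  have h3 : ¬ q ≤ 0 := by
    have hc0 : 0 ≤ cap m := by
      unfold cap
      split_ifs
      · omega
      · have := (solve_ge m).2
        omega
    omega
  constructor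
  · simp [h2]
  · unfold cap; simp [h3]

-- ---- B's per-group loop computes A's per-group simulation answer ----
theorem ga_shift (js : List Int) : ∀ (p m t : Int),
    js.foldl gaStep (p, m, t) =
      ((js.foldl gaStep (p, m, 0)).1, (js.foldl gaStep (p, m, 0)).2.1,
        t + (js.foldl gaStep (p, m, 0)).2.2) := by
  induction js with
  | nil => intro p m t; simp
  | cons j js ih =>
    intro p m t
    simp only [List.foldl_cons, gaStep]
    rw [ih (p + j) _ (t + _), ih (p + j) _ (0 + _)]
    simp only [Prod.mk.injEq, true_and]
    ring

theorem sim_eq_ga (js : List Int) : ∀ (p m a : Int), 0 ≤ m → p ≤ m →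
    (js.foldl simStep (cap m, p, a)).2.2 = a + (js.foldl gaStep (p, m, 0)).2.2 := by
  induction js with
  | nil => intro p m a _ _; simp
  | cons j js ih =>
    intro p m a hm hp
    simp only [List.foldl_cons, simStep, gaStep]
    rw [ga_shift js (p + j)]
    by_cases hbr : j + p ≤ cap m
    · have hnc : ¬ p + j > cap m := by omega
      simp only [if_pos hbr, if_neg hnc]
      have hstab := cap_stable m (p + j) hm (by omega)
      rw [← hstab]
      have hm' : 0 ≤ (if p + j > m then p + j else m) := by split_ifs <;> omega
      have hp' : p + j ≤ (if p + j > m then p + j else m) := by split_ifs <;> omega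
      rw [ih (p + j) _ a hm' hp']
      ring_nf
    · have hc : p + j > cap m := by omega
      obtain ⟨hmax, hcq⟩ := cap_growth m (p + j) hm hc
      simp only [if_neg hbr, if_pos hc]
      have hsolve : solve (p + j) = cap (if p + j > m then p + j else m) := by
        rw [hmax, hcq]
      rw [hsolve]
      have hm' : 0 ≤ (if p + j > m then p + j else m) := by split_ifs <;> omega
      have hp' : p + j ≤ (if p + j > m then p + j else m) := by split_ifs <;> omega
      rw [ih (p + j) _ (a + p) hm' hp']
      ring_nf

theorem delta_eq_groupAnswer (js : List Int) : delta js = groupAnswer js := by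
  unfold delta groupAnswer
  have h0 : cap 0 = 0 := by unfold cap; simp
  have := sim_eq_ga js 0 0 0 (le_refl 0) (le_refl 0)
  rw [h0] at this
  simpa using this

-- ---- grouping bookkeeping (keys are nodup; sumDelta of a modify) ----
theorem nodup_keys_modify (G : PySem.Dict Int (List Int)) (k : Int)
    (f : List Int → List Int) (h : G.keys.Nodup) : (G.modify k [] f).keys.Nodup := by
  rw [PySem.Dict.keys_modify]
  exact PySem.Dict.nodup_keys_insert _ _ _ h

theorem nodup_keys_grpStep (G : PySem.Dict Int (List Int)) (q : List Int)
    (h : G.keys.Nodup) : (groupStep G q).keys.Nodup := by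
  match q with
  | [i, j] => exact nodup_keys_modify G i _ h
  | [] => exact h
  | [_] => exact h
  | _ :: _ :: _ :: _ => exact h

theorem nodup_keys_foldl_grpStep (qs : List (List Int)) :
    ∀ (G : PySem.Dict Int (List Int)), G.keys.Nodup →
      (qs.foldl groupStep G).keys.Nodup := by
  induction qs with
  | nil => intro G h; exact h
  | cons q qs ih =>
    intro G h
    exact ih _ (nodup_keys_grpStep G q h)

theorem sum_map_update {i : Int} : ∀ (l : List Int), l.Nodup → i ∈ l →
    ∀ (f g : Int → Int), (∀ k ∈ l, k ≠ i → f k = g k) →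
      (l.map f).sum = (l.map g).sum + (f i - g i) := by
  intro l
  induction l with
  | nil => simp
  | cons a l ih =>
    intro hnd hi f g hfg
    simp only [List.map_cons, List.sum_cons]
    rcases List.mem_cons.mp hi with rfl | hi'
    · have hall : ∀ k ∈ l, f k = g k := fun k hk =>
        hfg k (List.mem_cons_of_mem _ hk) (fun he => (List.nodup_cons.mp hnd).1 (he ▸ hk))
      rw [List.map_congr_left hall]
      ring
    · have ha : a ≠ i := fun he => (List.nodup_cons.mp hnd).1 (he ▸ hi')
      rw [hfg a List.mem_cons_self ha,
        ih (List.nodup_cons.mp hnd).2 hi' f g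
          (fun k hk h => hfg k (List.mem_cons_of_mem _ hk) h)]
      ring

theorem sumDelta_modify (G : PySem.Dict Int (List Int)) (hnd : G.keys.Nodup) (i j : Int) :
    sumDelta (G.modify i [] (· ++ [j])) =
      sumDelta G + (delta (G.getD i [] ++ [j]) - delta (G.getD i [])) := by
  unfold sumDelta
  by_cases hc : G.contains i = true
  · have hkeys : (G.modify i [] (· ++ [j])).keys = G.keys := by
      rw [PySem.Dict.keys_modify, PySem.Dict.keys_insert_of_contains _ _ hc]
    rw [hkeys]
    have hi : i ∈ G.keys := (PySem.Dict.contains_iff_mem_keys G i).mp hc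
    rw [sum_map_update G.keys hnd hi _ _
      (fun k _ hki => by rw [PySem.Dict.getD_modify_of_ne _ _ _ hki])]
    rw [PySem.Dict.getD_modify_self]
  · have hc' : G.contains i = false := by simpa using hc
    have hni : i ∉ G.keys := fun hm => hc ((PySem.Dict.contains_iff_mem_keys G i).mpr hm)
    have hkeys : (G.modify i [] (· ++ [j])).keys = G.keys ++ [i] := by
      rw [PySem.Dict.keys_modify, PySem.Dict.keys_insert_of_not_contains _ _ hc']
    rw [hkeys, List.map_append, List.sum_append]
    have hG0 : G.getD i [] = [] := PySem.Dict.getD_of_not_contains G [] hc'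
    have hall : ∀ k ∈ G.keys,
        (G.modify i [] (· ++ [j])).getD k [] = G.getD k [] := fun k hk =>
      PySem.Dict.getD_modify_of_ne _ _ _ (fun he => hni (he ▸ hk))
    rw [List.map_congr_left (fun k hk => by rw [hall k hk])]
    simp only [List.map_cons, List.map_nil, List.sum_cons, List.sum_nil,
      PySem.Dict.getD_modify_self, hG0]
    have hd0 : delta ([] : List Int) = 0 := rfl
    rw [hd0]
    ring

-- main invariant: A's interleaved loop computes the sum of per-group answers
theorem mainA : ∀ (qs : List (List Int)) (d : PySem.Dict Int (Int × Int))
    (G : PySem.Dict Int (List Int)) (ans : Int),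
    (∀ q ∈ qs, q.length = 2) → G.keys.Nodup →
    (∀ k, d.contains k = G.contains k) →
    (∀ k, d.getD k (0, 0) =
      (((G.getD k []).foldl simStep (0, 0, 0)).1, ((G.getD k []).foldl simStep (0, 0, 0)).2.1)) →
    ans = sumDelta G →
    (qs.foldl stepA (ans, d)).1 = sumDelta (qs.foldl groupStep G) := by
  intro qs
  induction qs with
  | nil =>
    intro d G ans _ _ _ _ hans
    simpa using hans
  | cons q qs ih =>
    intro d G ans hpre hnd hcont hstate hans
    obtain ⟨i, j, rfl⟩ : ∃ i j, q = [i, j] := by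
      have h2 := hpre q List.mem_cons_self
      match q, h2 with
      | [i, j], _ => exact ⟨i, j, rfl⟩
    simp only [List.foldl_cons]
    have hgs : groupStep G [i, j] = G.modify i [] (· ++ [j]) := rfl
    have hstep : stepA (ans, d) [i, j] =
        (let d1 := if d.contains i then d else d.insert i (0, 0)
         let p := d1.getD i (0, 0)
         if j + p.2 ≤ p.1 then (ans, d1.insert i (p.1, p.2 + j))
         else (ans + p.2, d1.insert i (solve (p.2 + j), p.2 + j))) := rfl
    set d1 := if d.contains i then d else d.insert i (0, 0) with hd1
    have hd1getD : ∀ k, d1.getD k (0, 0) = d.getD k (0, 0) := by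
      intro k
      rw [hd1]
      split_ifs with h
      · rfl
      · by_cases hk : k = i
        · subst hk
          rw [PySem.Dict.getD_insert_self,
            PySem.Dict.getD_of_not_contains d _ (by simpa using h)]
        · rw [PySem.Dict.getD_insert_of_ne _ _ _ hk]
    have hd1cont : ∀ k, d1.contains k = ((k == i) || d.contains k) := by
      intro k
      rw [hd1]
      split_ifs with h
      · by_cases hk : k = i
        · subst hk; simp [h]
        · simp [hk]
      · rw [PySem.Dict.contains_insert]
    set X := (G.getD i []).foldl simStep (0, 0, 0) with hX
    have hXi : d.getD i (0, 0) = (X.1, X.2.1) := hstate i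
    have hp : d1.getD i (0, 0) = (X.1, X.2.1) := by rw [hd1getD i, hXi]
    rw [hstep]
    simp only [hp, hgs]
    have happ : (G.getD i [] ++ [j]).foldl simStep (0, 0, 0) = simStep X j := by
      rw [List.foldl_append]
      simp [hX]
    have hG2getD : (G.modify i [] (· ++ [j])).getD i [] = G.getD i [] ++ [j] :=
      PySem.Dict.getD_modify_self _ _ _ _
    have hnd2 : (G.modify i [] (· ++ [j])).keys.Nodup := nodup_keys_modify G i _ hnd
    have hsum2 := sumDelta_modify G hnd i j
    by_cases hbr : j + X.2.1 ≤ X.1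
    · simp only [if_pos hbr]
      apply ih _ _ _ (fun q hq => hpre q (List.mem_cons_of_mem _ hq)) hnd2
      · intro k
        rw [PySem.Dict.contains_insert, hd1cont k, PySem.Dict.contains_modify, hcont k]
        by_cases hk : k = i <;> simp [hk]
      · intro k
        by_cases hk : k = i
        · subst hk
          rw [PySem.Dict.getD_insert_self, hG2getD, happ]
          simp [simStep, hbr]
        · rw [PySem.Dict.getD_insert_of_ne _ _ _ hk,
            PySem.Dict.getD_modify_of_ne _ _ _ hk, hd1getD k, hstate k]
      · have hth : (simStep X j).2.2 = X.2.2 := by simp [simStep, hbr]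
        rw [hsum2, hans]
        unfold delta
        rw [happ, hth, ← hX]
        ring
    · simp only [if_neg hbr]
      apply ih _ _ _ (fun q hq => hpre q (List.mem_cons_of_mem _ hq)) hnd2
      · intro k
        rw [PySem.Dict.contains_insert, hd1cont k, PySem.Dict.contains_modify, hcont k]
        by_cases hk : k = i <;> simp [hk]
      · intro k
        by_cases hk : k = i
        · subst hk
          rw [PySem.Dict.getD_insert_self, hG2getD, happ]
          simp [simStep, hbr]
        · rw [PySem.Dict.getD_insert_of_ne _ _ _ hk,
            PySem.Dict.getD_modify_of_ne _ _ _ hk, hd1getD k, hstate k]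
      · have hth : (simStep X j).2.2 = X.2.2 + X.2.1 := by simp [simStep, hbr]
        rw [hsum2, hans]
        unfold delta
        rw [happ, hth, ← hX]
        ring

theorem alt_eq (qs : List (List Int)) : solution_alt qs = sumDelta (grpOf qs) := by
  unfold solution_alt grpOf sumDelta
  set G := qs.foldl groupStep PySem.Dict.empty with hG
  have hnd : G.keys.Nodup := nodup_keys_foldl_grpStep qs PySem.Dict.empty (by
    rw [PySem.Dict.keys_empty]; exact List.nodup_nil)
  show (G.values.map groupAnswer).sum = (G.keys.map (fun k => delta (G.getD k []))).sum
  rw [PySem.Dict.values_eq_map_keys G hnd [], List.map_map]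
  apply congrArg
  apply List.map_congr_left
  intro k _
  simp [delta_eq_groupAnswer]

-- ===== VERDICT (by name: the statement is the Claim_ definition above) =====
theorem solution_spec : Claim_equal_solution := by
  intro qs _ hpre
  unfold Spec_solution
  rw [alt_eq]
  exact mainA qs PySem.Dict.empty PySem.Dict.empty 0 hpre
    (by rw [PySem.Dict.keys_empty]; exact List.nodup_nil)
    (fun k => by rw [PySem.Dict.contains_empty, PySem.Dict.contains_empty])
    (fun k => by rw [PySem.Dict.getD_empty, PySem.Dict.getD_empty]; rfl)
    (by unfold sumDelta; rw [PySem.Dict.keys_empty]; rfl)
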